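-- pv_equiv track=rewrite | github.com/romgenie/lughat-althuban | arabicpython/formatter.py | _ensure_comma_space
-- ===== SOURCE A (Python) =====
-- def _ensure_comma_space(line: str) -> str:
--     """Add a space after ',' when missing, unless inside a string."""
--     result: list[str] = []
--     in_single = False
--     in_double = False
--     i = 0
--     while i < len(line):
--         c = line[i]
--         if c == "\\" and (in_single or in_double):
--             result.append(c)
--             if i + 1 < len(line):
--                 result.append(line[i + 1])
--             i += 2
--             continue
--         if c == "'" and not in_double:
--             in_single = not in_single
--         elif c == '"' and not in_single:
--             in_double = not in_double
--         elif c == "," and not in_single and not in_double: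
--             result.append(c)
--             if i + 1 < len(line) and line[i + 1] not in (" ", "\n", ")", "]", "}"):
--                 result.append(" ")
--             i += 1
--             continue
--         result.append(c)
--         i += 1
--     return "".join(result)
-- ===== SOURCE B (Python) =====
-- def _ensure_comma_space(line: str) -> str:
--     """Add a space after ',' when missing, unless inside a string.
--
--     Segment-jumping rewrite: instead of a per-character automaton with
--     in_single/in_double flags, scan the line as a sequence of segments:
--     string literals (copied verbatim, end found by a dedicated scan that
--     skips backslash escapes), commas (space inserted unless the next char
--     is one of " \n)]}"), and runs of other code characters (sliced out
--     wholesale).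
--     """
--     n = len(line)
--     pieces = []
--     i = 0
--     while i < n:
--         c = line[i]
--         if c == "'" or c == '"':
--             # string literal: find its end, copy it verbatim
--             j = i + 1
--             while j < n:
--                 if line[j] == "\\":
--                     j += 2
--                 elif line[j] == c:
--                     j += 1
--                     break
--                 else:
--                     j += 1
--             pieces.append(line[i:j])
--             i = j
--         elif c == ",":
--             pieces.append(c)
--             if i + 1 < n and line[i + 1] not in " \n)]}":
--                 pieces.append(" ")
--             i += 1
--         else:
--             # run of plain code characters
--             j = i + 1
--             while j < n and line[j] not in ",'\"":
--                 j += 1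
--             pieces.append(line[i:j])
--             i = j
--     return "".join(pieces)
-- ===== Notes on version B (the rewrite author's own statement) =====
-- stated objective: faster
-- what changed: Replaced the per-character automaton with in_single/in_double boolean flags by a segment-jumping scanner: string literals are delimited by a dedicated escape-aware scan and copied verbatim as whole slices, runs of plain code characters are sliced out wholesale, and commas are handled individually; no string-state flags exist.
import Mathlib
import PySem

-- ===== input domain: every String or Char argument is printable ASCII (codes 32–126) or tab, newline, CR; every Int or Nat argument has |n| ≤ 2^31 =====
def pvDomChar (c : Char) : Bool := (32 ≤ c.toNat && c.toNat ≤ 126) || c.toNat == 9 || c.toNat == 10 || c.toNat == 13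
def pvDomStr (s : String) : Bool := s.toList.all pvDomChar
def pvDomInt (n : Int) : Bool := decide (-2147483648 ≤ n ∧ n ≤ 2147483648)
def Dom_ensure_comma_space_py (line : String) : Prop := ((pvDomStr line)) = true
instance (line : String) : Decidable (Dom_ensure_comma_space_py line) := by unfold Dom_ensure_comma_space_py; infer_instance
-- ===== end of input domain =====

-- B replaces A's per-character flag automaton by a segment-jumping scanner (verbatim string
-- literals, whole code runs, commas): same O(n) but measurably faster by copying whole slices.

-- the literal character tuple / string (" ", "\n", ")", "]", "}") used by both Pythons
def pvIsSkip (c : Char) : Bool := c == ' ' || c == '\n' || c == ')' || c == ']' || c == '}'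

-- ===== PORT A =====
-- A's while-loop over the index, as structural recursion on the remaining characters,
-- with the same state (in_single, in_double); the backslash branch consumes two chars.
def goA : List Char → Bool → Bool → List Char
  | [], _, _ => []
  | c :: rest, s, d =>
    if (c == '\\') && (s || d) then
      match rest with
      | [] => [c]
      | c2 :: rest2 => c :: c2 :: goA rest2 s d
    else if (c == '\'') && !d then c :: goA rest (!s) d
    else if (c == '"') && !s then c :: goA rest s (!d)
    else if (c == ',') && !s && !d then
      match rest with
      | [] => c :: goA [] s d
      | c2 :: t => if pvIsSkip c2 then c :: goA (c2 :: t) s d else c :: ' ' :: goA (c2 :: t) s d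
    else c :: goA rest s d
  termination_by cs _ _ => cs.length
  decreasing_by all_goals simp

def ensure_comma_space_py (line : String) : String := String.mk (goA line.toList false false)

-- ===== PORT B =====
-- Source B's inner string scan: returns (the literal's chars after the opening quote, rest)
def scanStr (q : Char) : List Char → List Char × List Char
  | [] => ([], [])
  | c :: rest =>
    if c == '\\' then
      match rest with
      | [] => ([c], [])
      | c2 :: rest2 =>
        let p := scanStr q rest2
        (c :: c2 :: p.1, p.2)
    else if c == q then ([c], rest)
    else
      let p := scanStr q rest
      (c :: p.1, p.2)
  termination_by cs => cs.length
  decreasing_by all_goals simp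

-- needed by goB's termination: the rest returned by scanStr is no longer than its input
theorem scanStr_len_aux (q : Char) : ∀ (n : Nat) (cs : List Char), cs.length ≤ n →
    (scanStr q cs).2.length ≤ cs.length := by
  intro n
  induction n with
  | zero =>
    intro cs h
    cases cs with
    | nil => simp [scanStr]
    | cons c rest => simp at h
  | succ n ih =>
    intro cs h
    cases cs with
    | nil => simp [scanStr]
    | cons c rest =>
      by_cases h1 : (c == '\\') = true
      · cases rest with
        | nil => rw [scanStr.eq_def]; simp [h1]
        | cons c2 rest2 =>
          have hr := ih rest2 (by simp at h; omega)
          rw [scanStr.eq_def]; simp [h1]; omega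
      · by_cases h2 : (c == q) = true
        · rw [scanStr.eq_def]; simp [h1, h2]
        · have hr := ih rest (by simp at h; omega)
          rw [scanStr.eq_def]; simp [h1, h2]; omega

theorem scanStr_len (q : Char) (cs : List Char) : (scanStr q cs).2.length ≤ cs.length :=
  scanStr_len_aux q cs.length cs le_rfl

-- Source B's run-of-plain-code-characters predicate (",'\"" membership, negated)
def pvCode (c : Char) : Bool := !((c == ',') || (c == '\'') || (c == '"'))

-- Source B's outer loop: segments of string literal / comma / code run
def goB : List Char → List Char
  | [] => []
  | c :: rest =>
    if (c == '\'') || (c == '"') then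
      let p := scanStr c rest
      c :: (p.1 ++ goB p.2)
    else if c == ',' then
      match rest with
      | [] => c :: goB []
      | c2 :: t => if pvIsSkip c2 then c :: goB (c2 :: t) else c :: ' ' :: goB (c2 :: t)
    else
      (c :: rest.takeWhile pvCode) ++ goB (rest.dropWhile pvCode)
  termination_by cs => cs.length
  decreasing_by
  · exact Nat.lt_succ_of_le (by simpa using scanStr_len c rest)
  · simp
  · simp
  · simp
  · exact Nat.lt_succ_of_le (by simpa using List.length_dropWhile_le pvCode rest)

def ensure_comma_space_py_alt (line : String) : String := String.mk (goB line.toList)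

-- ===== PRECONDITION & SPEC =====
def Spec_ensure_comma_space_py (line : String) (out : String) : Prop := out = ensure_comma_space_py_alt line
instance (line : String) (out : String) : Decidable (Spec_ensure_comma_space_py line out) := by unfold Spec_ensure_comma_space_py; infer_instance

-- ===== CLAIM (what is proved, stated in full; the proofs are below) =====
def Claim_equal_ensure_comma_space_py : Prop := ∀ (line : String), Dom_ensure_comma_space_py line → Spec_ensure_comma_space_py line (ensure_comma_space_py line)

-- ===== LEMMAS AND PROOFS =====

theorem goA_nil (s d : Bool) : goA [] s d = [] := by rw [goA.eq_def]

theorem goB_nil : goB [] = [] := by rw [goB.eq_def]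

theorem scanStr_nil (q : Char) : scanStr q [] = ([], []) := by rw [scanStr.eq_def]

-- inside a string, A emits the literal verbatim and resumes in code state at scanStr's rest
theorem goA_str : ∀ (n : Nat) (cs : List Char), cs.length ≤ n →
    (goA cs true false = (scanStr '\'' cs).1 ++ goA (scanStr '\'' cs).2 false false) ∧
    (goA cs false true = (scanStr '"' cs).1 ++ goA (scanStr '"' cs).2 false false) := by
  intro n
  induction n with
  | zero =>
    intro cs h
    cases cs with
    | nil => simp [goA_nil, scanStr_nil]
    | cons c rest => simp at h
  | succ n ih =>
    intro cs h
    cases cs with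
    | nil => simp [goA_nil, scanStr_nil]
    | cons c rest =>
      by_cases hb : (c == '\\') = true
      · have hc : c = '\\' := by simpa using hb
        subst hc
        cases rest with
        | nil =>
          constructor <;> (rw [goA.eq_def, scanStr.eq_def]; simp [goA_nil])
        | cons c2 rest2 =>
          have hr := ih rest2 (by simp at h; omega)
          constructor
          · rw [goA.eq_def, scanStr.eq_def]; simp [hr.1]
          · rw [goA.eq_def, scanStr.eq_def]; simp [hr.2]
      · by_cases hs : (c == '\'') = true
        · have hc : c = '\'' := by simpa using hs
          subst hc
          have hr := ih rest (by simp at h; omega)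
          constructor
          · rw [goA.eq_def, scanStr.eq_def]; simp
          · rw [goA.eq_def, scanStr.eq_def]; simp [hr.2]
        · by_cases hd : (c == '"') = true
          · have hc : c = '"' := by simpa using hd
            subst hc
            have hr := ih rest (by simp at h; omega)
            constructor
            · rw [goA.eq_def, scanStr.eq_def]; simp [hr.1]
            · rw [goA.eq_def, scanStr.eq_def]; simp
          · have hr := ih rest (by simp at h; omega)
            constructor
            · rw [goA.eq_def, scanStr.eq_def]; simp [hb, hs, hd, hr.1]
            · rw [goA.eq_def, scanStr.eq_def]; simp [hb, hs, hd, hr.2]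

-- in code state, A copies a run of plain code characters verbatim
theorem goA_run : ∀ (t r : List Char), (∀ c ∈ t, pvCode c = true) →
    goA (t ++ r) false false = t ++ goA r false false := by
  intro t
  induction t with
  | nil => intro r _; simp
  | cons c t ih =>
    intro r hall
    have hc := hall c (List.mem_cons_self ..)
    simp [pvCode] at hc
    obtain ⟨⟨hc1, hc2⟩, hc3⟩ := hc
    rw [List.cons_append, goA.eq_def]
    simp [hc1, hc2, hc3, ih r (fun x hx => hall x (List.mem_cons_of_mem _ hx))]

theorem goA_eq_goB : ∀ (n : Nat) (cs : List Char), cs.length ≤ n →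
    goA cs false false = goB cs := by
  intro n
  induction n with
  | zero =>
    intro cs h
    cases cs with
    | nil => simp [goA_nil, goB_nil]
    | cons c rest => simp at h
  | succ n ih =>
    intro cs h
    cases cs with
    | nil => simp [goA_nil, goB_nil]
    | cons c rest =>
      by_cases hs : (c == '\'') = true
      · have hc : c = '\'' := by simpa using hs
        subst hc
        have h1 := (goA_str rest.length rest le_rfl).1
        have h2 := ih (scanStr '\'' rest).2
          (le_trans (scanStr_len '\'' rest) (by simp at h; omega))
        rw [goA.eq_def, goB.eq_def]
        simp [h1, h2]
      · by_cases hd : (c == '"') = true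
        · have hc : c = '"' := by simpa using hd
          subst hc
          have h1 := (goA_str rest.length rest le_rfl).2
          have h2 := ih (scanStr '"' rest).2
            (le_trans (scanStr_len '"' rest) (by simp at h; omega))
          rw [goA.eq_def, goB.eq_def]
          simp [h1, h2]
        · by_cases hm : (c == ',') = true
          · have hc : c = ',' := by simpa using hm
            subst hc
            rw [goA.eq_def, goB.eq_def]
            cases rest with
            | nil => simp [goA_nil, goB_nil]
            | cons c2 t =>
              have h2 := ih (c2 :: t) (by simp at h ⊢; omega)
              by_cases hsk : pvIsSkip c2 = true
              · simp [hsk, h2]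
              · simp [hsk, h2]
          · -- plain code character: B slices out the whole run
            have hcode : pvCode c = true := by simp [pvCode, hm, hs, hd]
            have hrun := goA_run (rest.takeWhile pvCode) (rest.dropWhile pvCode)
              (fun x hx => List.mem_takeWhile_imp hx)
            have h2 := ih (rest.dropWhile pvCode)
              (le_trans (List.length_dropWhile_le pvCode rest) (by simp at h; omega))
            rw [goA.eq_def, goB.eq_def]
            simp [hm, hs, hd]
            conv_lhs => rw [← List.takeWhile_append_dropWhile (p := pvCode) (l := rest)]
            rw [hrun, h2]

-- ===== VERDICT (by name: the statement is the Claim_ definition above) =====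
theorem ensure_comma_space_py_spec : Claim_equal_ensure_comma_space_py := by
  intro line _
  unfold Spec_ensure_comma_space_py ensure_comma_space_py ensure_comma_space_py_alt
  rw [goA_eq_goB line.toList.length line.toList le_rfl]
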